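-- pv_equiv track=rewrite | github.com/andmansim/ejercicios-ordenar | especificaciones/funciones.py | explorar
-- ===== SOURCE A (Python) =====
-- def explorar(t):
--
--     i = 0
--     fin = len(t)
--     while i < fin - 1:
--         if t[i] > t[i + 1]: #compara elementos con el siguente y pone el máximo al final
--             t[i], t[i + 1] = t[i + 1], t[i]
--         i = i + 1
--
--     t.insert(0, t[len(t) - 1]) #coloca el máximo al principio y mueve el resto una posición a la derecha
--     del(t[len(t) - 1])
--     return t
-- ===== SOURCE B (Python) =====
-- def explorar(t):
--     # One forward carry scan: carry holds the running maximum (strict > like A);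
--     # smaller-or-equal elements are emitted behind it. [carry] + out is the
--     # bubble-passed list rotated so the maximum is first. Same IndexError on [].
--     carry = t[0]
--     out = []
--     for x in t[1:]:
--         if carry > x:
--             out.append(x)
--         else:
--             out.append(carry)
--             carry = x
--     t[:] = [carry] + out
--     return t
-- ===== Notes on version B (the rewrite author's own statement) =====
-- stated objective: alternative
-- what changed: Replaces the index-based in-place swap loop plus insert/delete rotation with a single forward carry scan that builds a new list (carry = running maximum) and writes [carry]+out back, so no element swapping or index arithmetic is used.
-- outside the precondition, e.g. on explorar([]): A raises IndexError, B raises IndexError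
import Mathlib
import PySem

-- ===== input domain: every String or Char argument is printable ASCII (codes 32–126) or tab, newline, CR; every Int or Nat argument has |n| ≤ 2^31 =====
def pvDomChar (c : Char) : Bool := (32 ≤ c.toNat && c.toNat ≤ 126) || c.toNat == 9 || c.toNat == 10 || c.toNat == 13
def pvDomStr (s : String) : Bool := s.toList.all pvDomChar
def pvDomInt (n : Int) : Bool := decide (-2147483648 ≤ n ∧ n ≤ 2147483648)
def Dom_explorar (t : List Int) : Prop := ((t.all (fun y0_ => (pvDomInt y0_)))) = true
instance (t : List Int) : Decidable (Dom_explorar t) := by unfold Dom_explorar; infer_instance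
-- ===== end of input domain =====

-- B replaces A's in-place swap loop + insert/delete rotation by a carry scan building a new
-- list (alternative decomposition, same cost); both Pythons mutate t in place identically,
-- and the equivalence proved here is about the RETURN value.

-- ===== PORT A =====
-- while i < fin - 1: compare/swap t[i], t[i+1]; i is always in range here, so pyGetD/pySetD are exact
def explorarLoop (t : List Int) (i fin : Int) : List Int :=
  if _h : i < fin - 1 then
    let a := PySem.List.pyGetD t i 0
    let b := PySem.List.pyGetD t (i + 1) 0
    let t' := if a > b then PySem.List.pySetD (PySem.List.pySetD t i b) (i + 1) a else t
    explorarLoop t' (i + 1) fin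
  else t
termination_by (fin - 1 - i).toNat
decreasing_by omega

def explorar (t : List Int) : List Int :=
  let fin : Int := t.length
  let t1 := explorarLoop t 0 fin
  -- t.insert(0, t[len(t)-1]); del t[len(t)-1]  (len ≥ 1 under Pre_; t[-... ] exact there)
  let t2 := PySem.List.pyGetD t1 ((t1.length : Int) - 1) 0 :: t1
  t2.dropLast

-- ===== PORT B =====
-- carry scan: carry = running maximum, out = the elements left behind it
def explorarStep (acc : List Int × Int) (x : Int) : List Int × Int :=
  if acc.2 > x then (acc.1 ++ [x], acc.2) else (acc.1 ++ [acc.2], x)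

def explorar_alt (t : List Int) : List Int :=
  match t with
  | [] => []   -- unreachable under Pre_ (t[0] raises in Python)
  | c :: rest =>
    let s := rest.foldl explorarStep ([], c)
    s.2 :: s.1

-- ===== PRECONDITION & SPEC =====
-- Pre_ excludes only the empty list, on which A raises IndexError (t[len(t)-1] of []).
def Pre_explorar (t : List Int) : Prop := t ≠ []
instance (t : List Int) : Decidable (Pre_explorar t) := by unfold Pre_explorar; infer_instance
def pvWitness_explorar : List Int := [3, 1, 2]

def Spec_explorar (t : List Int) (out : List Int) : Prop := out = explorar_alt t
instance (t : List Int) (out : List Int) : Decidable (Spec_explorar t out) := by unfold Spec_explorar; infer_instance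

-- ===== CLAIM (what is proved, stated in full; the proofs are below) =====
def Claim_equal_explorar : Prop := ∀ (t : List Int), Dom_explorar t → Pre_explorar t → Spec_explorar t (explorar t)

-- ===== LEMMAS AND PROOFS =====

theorem pvGetD_append_len (pre : List Int) (y : Int) (ys : List Int) :
    PySem.List.pyGetD (pre ++ y :: ys) (pre.length : Int) 0 = y := by
  simp

theorem pvGetD_append_len_succ (pre : List Int) (y z : Int) (ys : List Int) :
    PySem.List.pyGetD (pre ++ y :: z :: ys) ((pre.length : Int) + 1) 0 = z := by
  have : ((pre.length : Int) + 1) = ((pre.length + 1 : Nat) : Int) := by push_cast; ring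
  rw [this, PySem.List.pyGetD_natCast]
  simp [List.getD_eq_getElem?_getD, List.getElem?_append_right]

theorem pvSet_append_len (pre : List Int) (y : Int) (ys : List Int) (v : Int) :
    (pre ++ y :: ys).set pre.length v = pre ++ v :: ys := by
  induction pre with
  | nil => simp
  | cons p ps ih => simp [ih]

theorem pvSet_append_len_succ (pre : List Int) (y z : Int) (ys : List Int) (v : Int) :
    (pre ++ y :: z :: ys).set (pre.length + 1) v = pre ++ y :: v :: ys := by
  induction pre with
  | nil => simp
  | cons p ps ih => simp [ih]

theorem pvLoop_eq (rest : List Int) : ∀ (pre : List Int) (c : Int),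
    explorarLoop (pre ++ c :: rest) (pre.length : Int) ((pre.length + 1 + rest.length : Nat) : Int) =
      (rest.foldl explorarStep (pre, c)).1 ++ [(rest.foldl explorarStep (pre, c)).2] := by
  induction rest with
  | nil =>
    intro pre c
    rw [explorarLoop]
    simp
  | cons x rs ih =>
    intro pre c
    rw [explorarLoop]
    have hlt : (pre.length : Int) < ((pre.length + 1 + (x :: rs).length : Nat) : Int) - 1 := by
      simp; omega
    rw [dif_pos hlt]
    simp only [pvGetD_append_len, pvGetD_append_len_succ (ys := rs)]
    by_cases hcx : c > x
    · rw [if_pos hcx]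
      have hset : PySem.List.pySetD
          (PySem.List.pySetD (pre ++ c :: x :: rs) (pre.length : Int) x)
          ((pre.length : Int) + 1) c = (pre ++ [x]) ++ c :: rs := by
        have h1 : ((pre.length : Int) + 1) = ((pre.length + 1 : Nat) : Int) := by push_cast; ring
        rw [PySem.List.pySetD_natCast, pvSet_append_len, h1, PySem.List.pySetD_natCast,
          pvSet_append_len_succ]
        simp
      rw [hset]
      have h2 : ((pre.length : Int) + 1) = (((pre ++ [x]).length : Nat) : Int) := by simp
      have h3 : ((pre.length + 1 + (x :: rs).length : Nat) : Int) =
          (((pre ++ [x]).length + 1 + rs.length : Nat) : Int) := by simp; omega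
      rw [h2, h3, ih]
      simp [List.foldl_cons, explorarStep, hcx]
    · rw [if_neg hcx]
      have h0 : pre ++ c :: x :: rs = (pre ++ [c]) ++ x :: rs := by simp
      have h2 : ((pre.length : Int) + 1) = (((pre ++ [c]).length : Nat) : Int) := by simp
      have h3 : ((pre.length + 1 + (x :: rs).length : Nat) : Int) =
          (((pre ++ [c]).length + 1 + rs.length : Nat) : Int) := by simp; omega
      rw [h0, h2, h3, ih]
      simp [List.foldl_cons, explorarStep, hcx]

-- ===== VERDICT (by name: the statement is the Claim_ definition above) =====
theorem explorar_spec : Claim_equal_explorar := by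
  intro t _hdom hpre
  unfold Spec_explorar
  match t with
  | [] => exact absurd rfl hpre
  | c :: rest =>
    have hA : explorarLoop (c :: rest) 0 (((c :: rest).length : Nat) : Int) =
        (rest.foldl explorarStep ([], c)).1 ++ [(rest.foldl explorarStep ([], c)).2] := by
      have h := pvLoop_eq rest [] c
      simp only [List.nil_append, List.length_nil, Int.natCast_zero] at h
      have : (((c :: rest).length : Nat) : Int) = ((0 + 1 + rest.length : Nat) : Int) := by
        simp only [List.length_cons]; push_cast; ring
      rw [this, h]
    simp only [explorar, explorar_alt, hA]
    set s := rest.foldl explorarStep ([], c) with hs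
    have hlen : (((s.1 ++ [s.2]).length : Nat) : Int) - 1 = ((s.1.length : Nat) : Int) := by
      simp
    rw [hlen, pvGetD_append_len s.1 s.2 []]
    show (s.2 :: s.1 ++ [s.2]).dropLast = s.2 :: s.1
    rw [show s.2 :: s.1 ++ [s.2] = (s.2 :: s.1) ++ [s.2] by simp, List.dropLast_concat]
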